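-- pv_equiv track=rewrite | github.com/Geonu-Lee/Algorithm | 프로그래머스/lv2/87946. 피로도/피로도.py | solution
-- ===== SOURCE A (Python) =====
-- from itertools import permutations
--
-- def solution(k, dungeons):
--     answer = -1
--     arr = [i  for i in range(len(dungeons))]
--     arr = list(permutations(arr, len(dungeons)))
--     for d in arr:
--         count = 0
--         t_k = k
--         for i in range(len(dungeons)):
--             m, u = dungeons[d[i]]  # 최소 필요, 소모 피로
--             if t_k >= m:
--                 count += 1
--                 t_k -= u
--             else:
--                 break
--         answer = max(answer, count)
--
--     return answer
-- ===== SOURCE B (Python) =====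
-- def solution(k, dungeons):
--     # Recursive DFS backtracking: try each still-available dungeon whose
--     # minimum requirement is met, recurse on the remaining list, and keep
--     # the best count; explores only clearable prefixes (pruning) instead
--     # of enumerating all len(dungeons)! permutations up front.
--     def dfs(fatigue, remaining):
--         best = 0
--         for idx in range(len(remaining)):
--             m, u = remaining[idx]
--             if fatigue >= m:
--                 best = max(best, 1 + dfs(fatigue - u, remaining[:idx] + remaining[idx + 1:]))
--         return best
--     return dfs(k, dungeons)
-- ===== Notes on version B (the rewrite author's own statement) =====
-- stated objective: faster
-- what changed: Replaced A's up-front enumeration of all n! index permutations (scanning each full order and breaking at the first unclearable dungeon) with recursive DFS backtracking that only branches on still-available dungeons whose minimum requirement is met, so only clearable prefixes are ever explored.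
import Mathlib
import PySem

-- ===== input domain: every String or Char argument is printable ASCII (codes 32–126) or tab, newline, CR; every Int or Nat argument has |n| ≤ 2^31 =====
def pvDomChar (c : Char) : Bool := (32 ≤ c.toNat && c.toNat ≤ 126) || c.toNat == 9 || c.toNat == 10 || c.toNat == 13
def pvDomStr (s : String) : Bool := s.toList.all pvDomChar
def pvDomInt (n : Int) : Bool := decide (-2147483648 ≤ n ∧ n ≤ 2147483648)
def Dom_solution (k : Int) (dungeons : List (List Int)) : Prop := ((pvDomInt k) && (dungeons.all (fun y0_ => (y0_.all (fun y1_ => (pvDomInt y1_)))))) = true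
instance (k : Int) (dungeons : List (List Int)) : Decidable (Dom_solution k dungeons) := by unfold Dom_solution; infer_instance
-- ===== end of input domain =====

-- B replaces A's up-front enumeration of all n! permutations with recursive
-- DFS backtracking that only branches on dungeons whose requirement is met.

-- ===== PORT A =====

-- all 'remove position idx' decompositions of a list, in position order:
-- [(l[0], rest), (l[1], rest), ...]; shared shape for itertools.permutations (A)
-- and for B's loop 'remaining[idx], remaining[:idx]+remaining[idx+1:]'.
def pvSelects {α : Type} : List α → List (α × List α)
  | [] => []
  | x :: xs => (x, xs) :: (pvSelects xs).map (fun p => (p.1, x :: p.2))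

-- port of list(itertools.permutations(lst, len(lst))): full-length permutations
-- in itertools' order (first element chosen in list order, then recurse).
-- fuel = lst.length makes the recursion structural; it is always sufficient.
def pvPerms {α : Type} : Nat → List α → List (List α)
  | _, [] => [[]]
  | 0, _ :: _ => []
  | n + 1, x :: xs =>
      (pvSelects (x :: xs)).flatMap (fun p => (pvPerms n p.2).map (p.1 :: ·))

-- the inner 'for i in range(len(dungeons))' loop of A, walking d with the
-- (count, t_k) state; 'break' returns the current count.
-- dungeons[d[i]] and the 'm, u =' unpacking are exact under Pre_solution
-- (indices come from permutations of range(len(dungeons)); rows have length 2).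
def pvCountA (dungeons : List (List Int)) : List Int → Int → Int → Int
  | [], count, _ => count
  | di :: d', count, t_k =>
      let row := PySem.List.pyGetD dungeons di []
      let m := PySem.List.pyGetD row 0 0
      let u := PySem.List.pyGetD row 1 0
      if m ≤ t_k then pvCountA dungeons d' (count + 1) (t_k - u) else count

def solution (k : Int) (dungeons : List (List Int)) : Int :=
  let arr : List Int := (List.range dungeons.length).map (fun i : Nat => (i : Int))
  let perms := pvPerms dungeons.length arr
  perms.foldl (fun answer d => max answer (pvCountA dungeons d 0 k)) (-1)

-- ===== PORT B =====

-- B's dfs(fatigue, remaining): loop over positions idx, unpack remaining[idx],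
-- recurse on remaining without idx when the requirement is met, keep the best.
-- fuel = remaining.length makes the recursion structural; always sufficient.
def pvDfs : Nat → Int → List (List Int) → Int
  | 0, _, _ => 0
  | n + 1, fatigue, remaining =>
      (pvSelects remaining).foldl (fun best p =>
        let m := PySem.List.pyGetD p.1 0 0
        let u := PySem.List.pyGetD p.1 1 0
        if m ≤ fatigue then max best (1 + pvDfs n (fatigue - u) p.2) else best) 0

def solution_alt (k : Int) (dungeons : List (List Int)) : Int :=
  pvDfs dungeons.length k dungeons

-- ===== PRECONDITION & SPEC =====
-- Pre_ excludes only inputs where Python A raises: any row of length ≠ 2 makes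
-- the unpacking 'm, u = dungeons[d[i]]' raise ValueError/TypeError (every row
-- is reached, e.g. first in some permutation).
def Pre_solution (k : Int) (dungeons : List (List Int)) : Prop :=
  ∀ row ∈ dungeons, row.length = 2
instance (k : Int) (dungeons : List (List Int)) : Decidable (Pre_solution k dungeons) := by
  unfold Pre_solution; infer_instance

def pvWitness_solution : Int × List (List Int) := (80, [[80, 20], [50, 40], [30, 10]])

def Spec_solution (k : Int) (dungeons : List (List Int)) (out : Int) : Prop := out = solution_alt k dungeons
instance (k : Int) (dungeons : List (List Int)) (out : Int) : Decidable (Spec_solution k dungeons out) := by unfold Spec_solution; infer_instance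

-- ===== CLAIM (what is proved, stated in full; the proofs are below) =====
def Claim_equal_solution : Prop := ∀ (k : Int) (dungeons : List (List Int)), Dom_solution k dungeons → Pre_solution k dungeons → Spec_solution k dungeons (solution k dungeons)

-- ===== LEMMAS AND PROOFS =====

-- row lookup in dungeons by (Int) index
def pvRowf (dungeons : List (List Int)) (i : Int) : List Int :=
  PySem.List.pyGetD dungeons i []

-- length of the clearable prefix of a row list
def pvCnt : Int → List (List Int) → Int
  | _, [] => 0
  | k, r :: rs =>
      if PySem.List.pyGetD r 0 0 ≤ k then 1 + pvCnt (k - PySem.List.pyGetD r 1 0) rs else 0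

lemma pvCountA_eq_cnt (dg : List (List Int)) :
    ∀ (d : List Int) (c t : Int),
      pvCountA dg d c t = c + pvCnt t (d.map (pvRowf dg)) := by
  intro d
  induction d with
  | nil => intro c t; simp [pvCountA, pvCnt]
  | cons di d' ih =>
      intro c t
      simp only [pvCountA, pvCnt, List.map_cons, pvRowf]
      split
      · rw [ih]; ring
      · simp

lemma pvCnt_nonneg : ∀ (k : Int) (rs : List (List Int)), 0 ≤ pvCnt k rs := by
  intro k rs
  induction rs generalizing k with
  | nil => simp [pvCnt]
  | cons r rs ih =>
      simp only [pvCnt]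
      split
      · have := ih (k - PySem.List.pyGetD r 1 0); omega
      · omega

lemma pvSelects_map {α β : Type} (f : α → β) :
    ∀ (l : List α),
      pvSelects (l.map f) = (pvSelects l).map (fun p => (f p.1, p.2.map f)) := by
  intro l
  induction l with
  | nil => rfl
  | cons x xs ih =>
      simp [pvSelects, ih, List.map_map, Function.comp_def]

lemma pvPerms_map {α β : Type} (f : α → β) :
    ∀ (n : Nat) (l : List α),
      pvPerms n (l.map f) = (pvPerms n l).map (List.map f) := by
  intro n
  induction n with
  | zero =>
      intro l
      cases l with
      | nil => rfl
      | cons x xs => rfl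
  | succ n ih =>
      intro l
      cases l with
      | nil => rfl
      | cons x xs =>
          simp only [List.map_cons, pvPerms]
          rw [show (f x :: xs.map f) = (x :: xs).map f from rfl, pvSelects_map]
          simp [List.flatMap_map, List.map_flatMap, ih, List.map_map,
            Function.comp_def]

lemma pvPerms_ne_nil : ∀ (n : Nat) (l : List (List Int)), l.length = n → pvPerms n l ≠ [] := by
  intro n
  induction n with
  | zero =>
      intro l hl
      have : l = [] := List.length_eq_zero_iff.mp hl
      subst this; simp [pvPerms]
  | succ n ih =>
      intro l hl
      cases l with
      | nil => simp at hl
      | cons x xs =>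
          have hx : pvPerms n xs ≠ [] := ih xs (by simpa using hl)
          simp [pvPerms, pvSelects, hx]

lemma pvSelects_len {α : Type} :
    ∀ (l : List α), ∀ p ∈ pvSelects l, p.2.length + 1 = l.length := by
  intro l
  induction l with
  | nil => intro p hp; simp [pvSelects] at hp
  | cons x xs ih =>
      intro p hp
      simp only [pvSelects, List.mem_cons, List.mem_map] at hp
      rcases hp with h | ⟨q, hq, rfl⟩
      · subst h; simp
      · have := ih q hq; simp at this ⊢; omega

lemma foldl_max_hoist {α : Type} (g : α → Int) :
    ∀ (P : List α) (a b : Int),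
      P.foldl (fun acc p => max acc (g p)) (max a b)
        = max a (P.foldl (fun acc p => max acc (g p)) b) := by
  intro P
  induction P with
  | nil => intro a b; rfl
  | cons x xs ih =>
      intro a b
      simp only [List.foldl_cons]
      rw [max_assoc, ih]

lemma foldl_max_shift {α : Type} (g : α → Int) :
    ∀ (P : List α) (c : Int),
      P.foldl (fun a p => max a (1 + g p)) (1 + c)
        = 1 + P.foldl (fun a p => max a (g p)) c := by
  intro P
  induction P with
  | nil => intro c; rfl
  | cons x xs ih =>
      intro c
      simp only [List.foldl_cons]
      have : max (1 + c) (1 + g x) = 1 + max c (g x) := by omega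
      rw [this, ih]

lemma foldl_max_zero {α : Type} :
    ∀ (P : List α) (c : Int), P.foldl (fun a (_ : α) => max a 0) (max c 0) = max c 0 := by
  intro P
  induction P with
  | nil => intro c; rfl
  | cons x xs ih =>
      intro c
      simp only [List.foldl_cons]
      have : max (max c 0) 0 = max c 0 := by omega
      rw [this, ih]

lemma foldl_le_of_step {α : Type} (f : Int → α → Int) (h : ∀ a x, a ≤ f a x) :
    ∀ (S : List α) (b : Int), b ≤ S.foldl f b := by
  intro S
  induction S with
  | nil => intro b; simp
  | cons x xs ih =>
      intro b
      simp only [List.foldl_cons]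
      exact le_trans (h b x) (ih (f b x))

lemma pvDfs_nonneg : ∀ (n : Nat) (k : Int) (rem : List (List Int)), 0 ≤ pvDfs n k rem := by
  intro n k rem
  cases n with
  | zero => simp [pvDfs]
  | succ n =>
      simp only [pvDfs]
      apply foldl_le_of_step
      intro a p
      dsimp only
      split
      · exact le_max_left _ _
      · exact le_rfl

lemma foldl_flatMap {α β : Type} (f : Int → β → Int) (g : α → List β) :
    ∀ (l : List α) (c : Int),
      (l.flatMap g).foldl f c = l.foldl (fun c x => (g x).foldl f c) c := by
  intro l
  induction l with
  | nil => intro c; rfl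
  | cons x xs ih =>
      intro c
      simp only [List.flatMap_cons, List.foldl_append, List.foldl_cons, ih]

-- one block of the permutation fold (all permutations starting with y), in
-- closed form, assuming the main statement at fuel n (= ys.length).
lemma block_eq (n : Nat) (k : Int)
    (IH : ∀ (rem : List (List Int)), rem.length = n → ∀ k,
      (pvPerms n rem).foldl (fun a d => max a (pvCnt k d)) (-1) = pvDfs n k rem)
    (y : List Int) (ys : List (List Int)) (hlen : ys.length = n) (acc : Int) :
    ((pvPerms n ys).map (y :: ·)).foldl (fun a p => max a (pvCnt k p)) acc
      = if PySem.List.pyGetD y 0 0 ≤ k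
          then max acc (1 + pvDfs n (k - PySem.List.pyGetD y 1 0) ys)
          else max acc 0 := by
  rw [List.foldl_map]
  obtain ⟨p0, ps, hP⟩ := List.exists_cons_of_ne_nil (pvPerms_ne_nil n ys hlen)
  by_cases hc : PySem.List.pyGetD y 0 0 ≤ k
  · simp only [hc, if_true]
    have hstep : ∀ (a : Int) (p : List (List Int)),
        max a (pvCnt k (y :: p))
          = max a (1 + pvCnt (k - PySem.List.pyGetD y 1 0) p) := by
      intro a p; simp [pvCnt, hc]
    calc (pvPerms n ys).foldl (fun a p => max a (pvCnt k (y :: p))) acc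
        = (pvPerms n ys).foldl
            (fun a p => max a (1 + pvCnt (k - PySem.List.pyGetD y 1 0) p)) acc := by
          exact PySem.List.foldl_congr_mem _ _ _ _ (fun a p _ => hstep a p)
      _ = max acc (1 + pvDfs n (k - PySem.List.pyGetD y 1 0) ys) := by
          rw [hP]
          simp only [List.foldl_cons]
          rw [foldl_max_hoist, foldl_max_shift]
          congr 1
          have hnn := pvCnt_nonneg (k - PySem.List.pyGetD y 1 0) p0
          have : max (-1 : Int) (pvCnt (k - PySem.List.pyGetD y 1 0) p0)
              = pvCnt (k - PySem.List.pyGetD y 1 0) p0 := by omega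
          rw [← IH ys hlen (k - PySem.List.pyGetD y 1 0), hP]
          simp only [List.foldl_cons]
          rw [this]
  · simp only [hc, if_false]
    have hstep : ∀ (a : Int) (p : List (List Int)),
        max a (pvCnt k (y :: p)) = max a 0 := by
      intro a p; simp [pvCnt, hc]
    calc (pvPerms n ys).foldl (fun a p => max a (pvCnt k (y :: p))) acc
        = (pvPerms n ys).foldl (fun a (_ : List (List Int)) => max a 0) acc := by
          exact PySem.List.foldl_congr_mem _ _ _ _ (fun a p _ => hstep a p)
      _ = max acc 0 := by
          rw [hP]
          simp only [List.foldl_cons]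
          exact foldl_max_zero ps acc

-- fold over selects: A's per-block closed form equals B's step, once both run
-- from the same nonnegative accumulator.
lemma fold_sync (n : Nat) (k : Int) :
    ∀ (S : List (List Int × List (List Int))) (a : Int), 0 ≤ a →
      S.foldl (fun acc p =>
          if PySem.List.pyGetD p.1 0 0 ≤ k
            then max acc (1 + pvDfs n (k - PySem.List.pyGetD p.1 1 0) p.2)
            else max acc 0) a
        = S.foldl (fun best p =>
            let m := PySem.List.pyGetD p.1 0 0
            let u := PySem.List.pyGetD p.1 1 0
            if m ≤ k then max best (1 + pvDfs n (k - u) p.2) else best) a := by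
  intro S
  induction S with
  | nil => intro a _; rfl
  | cons p S' ih =>
      intro a ha
      simp only [List.foldl_cons]
      by_cases hc : PySem.List.pyGetD p.1 0 0 ≤ k
      · simp only [hc, if_true]
        exact ih _ (le_trans ha (le_max_left _ _))
      · simp only [hc, if_false]
        have : max a 0 = a := by omega
        rw [this]
        exact ih a ha

lemma main_lemma : ∀ (n : Nat) (rem : List (List Int)), rem.length = n → ∀ (k : Int),
    (pvPerms n rem).foldl (fun a d => max a (pvCnt k d)) (-1) = pvDfs n k rem := by
  intro n
  induction n with
  | zero =>
      intro rem hlen k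
      have : rem = [] := List.length_eq_zero_iff.mp hlen
      subst this
      simp [pvPerms, pvCnt, pvDfs]
  | succ n ih =>
      intro rem hlen k
      cases rem with
      | nil => simp at hlen
      | cons r rs =>
          simp only [pvPerms, pvDfs]
          rw [foldl_flatMap]
          have hblock :
              (pvSelects (r :: rs)).foldl
                  (fun acc p => ((pvPerms n p.2).map (p.1 :: ·)).foldl
                    (fun a d => max a (pvCnt k d)) acc) (-1)
                = (pvSelects (r :: rs)).foldl
                    (fun acc p =>
                      if PySem.List.pyGetD p.1 0 0 ≤ k
                        then max acc (1 + pvDfs n (k - PySem.List.pyGetD p.1 1 0) p.2)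
                        else max acc 0) (-1) := by
            apply PySem.List.foldl_congr_mem
            intro acc p hp
            have hlp : p.2.length = n := by
              have := pvSelects_len (r :: rs) p hp
              simp at this hlen; omega
            exact block_eq n k ih p.1 p.2 hlp acc
          rw [hblock]
          -- peel the first select (it exists since rem is a cons)
          simp only [pvSelects, List.foldl_cons]
          by_cases hc : PySem.List.pyGetD r 0 0 ≤ k
          · simp only [hc, if_true]
            have h1 : max (-1 : Int) (1 + pvDfs n (k - PySem.List.pyGetD r 1 0) rs)
                = max 0 (1 + pvDfs n (k - PySem.List.pyGetD r 1 0) rs) := by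
              have := pvDfs_nonneg n (k - PySem.List.pyGetD r 1 0) rs; omega
            rw [h1]
            exact fold_sync n k _ _ (le_max_left _ _)
          · simp only [hc, if_false]
            have h1 : max (-1 : Int) 0 = (0 : Int) := by omega
            rw [h1]
            exact fold_sync n k _ _ le_rfl

lemma arr_map_rowf (dg : List (List Int)) :
    ((List.range dg.length).map (fun i : Nat => (i : Int))).map (pvRowf dg) = dg := by
  rw [List.map_map]
  apply List.ext_getElem
  · simp
  · intro i h1 h2
    simp only [List.getElem_map, List.getElem_range, Function.comp_apply, pvRowf,
      PySem.List.pyGetD_natCast]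
    exact List.getD_eq_getElem dg [] h2

-- ===== VERDICT (by name: the statement is the Claim_ definition above) =====
theorem solution_spec : Claim_equal_solution := by
  intro k dungeons _ _
  unfold Spec_solution solution solution_alt
  simp only []
  have h1 : ∀ d : List Int, pvCountA dungeons d 0 k = pvCnt k (d.map (pvRowf dungeons)) := by
    intro d
    rw [pvCountA_eq_cnt]; ring
  calc (pvPerms dungeons.length ((List.range dungeons.length).map (fun i : Nat => (i : Int)))).foldl
          (fun answer d => max answer (pvCountA dungeons d 0 k)) (-1)
      = (pvPerms dungeons.length ((List.range dungeons.length).map (fun i : Nat => (i : Int)))).foldl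
          (fun answer d => max answer (pvCnt k (d.map (pvRowf dungeons)))) (-1) := by
        exact PySem.List.foldl_congr_mem _ _ _ _ (fun a d _ => by rw [h1])
    _ = ((pvPerms dungeons.length ((List.range dungeons.length).map (fun i : Nat => (i : Int)))).map
          (List.map (pvRowf dungeons))).foldl (fun a d => max a (pvCnt k d)) (-1) := by
        rw [List.foldl_map]
    _ = (pvPerms dungeons.length dungeons).foldl (fun a d => max a (pvCnt k d)) (-1) := by
        rw [← pvPerms_map, arr_map_rowf]
    _ = pvDfs dungeons.length k dungeons := main_lemma dungeons.length dungeons rfl k
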